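-- pv_equiv track=rewrite | github.com/SLWRTHNU/Iris-Classic-Go | app_main.py | _find_int_after
-- ===== SOURCE A (Python) =====
-- def _find_int_after(s, key, start=0):
--     i = s.find(key, start)
--     if i < 0:
--         return None, -1
--     i += len(key)
--
--     # Allow spaces, tabs, CR, LF
--     while i < len(s) and s[i] in " \t\r\n":
--         i += 1
--
--     j = i
--
--     # Optional minus sign
--     if j < len(s) and s[j] == "-":
--         j += 1
--
--     while j < len(s) and s[j].isdigit():
--         j += 1
--
--     if j == i or (j == i + 1 and s[i] == "-"):
--         return None, -1
--
--     return int(s[i:j]), j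
-- ===== SOURCE B (Python) =====
-- # Table-driven DFA: one generic driver loop over a transition table replaces
-- # A's three staged hand-written scans (whitespace / sign / digits).
-- _TRANS = {
--     (0, "w"): 0,  # skipping leading whitespace
--     (0, "m"): 1,  # saw the optional minus sign
--     (0, "d"): 2,  # in the digit run (accepting state)
--     (1, "d"): 2,
--     (2, "d"): 2,
-- }
--
--
-- def _classify(c):
--     if c in " \t\r\n":
--         return "w"
--     if c == "-":
--         return "m"
--     if c.isdigit():
--         return "d"
--     return "o"
--
--
-- def _find_int_after(s, key, start=0):
--     i = s.find(key, start)
--     if i < 0: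
--         return None, -1
--     j = i + len(key)
--     state = 0
--     num_start = j
--     while j < len(s):
--         nxt = _TRANS.get((state, _classify(s[j])))
--         if nxt is None:
--             break
--         if state == 0 and nxt != 0:
--             num_start = j  # first char of the number token
--         state = nxt
--         j += 1
--     if state != 2:
--         return None, -1
--     return int(s[num_start:j]), j
-- ===== Notes on version B (the rewrite author's own statement) =====
-- stated objective: alternative
-- what changed: A's three staged hand-written scans (whitespace skip, optional minus, digit run) are replaced by a table-driven DFA: one generic driver loop looks up (state, character-class) transitions in a dict, records where the number token starts, and accepts iff it ends in the digit state.
import Mathlib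
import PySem

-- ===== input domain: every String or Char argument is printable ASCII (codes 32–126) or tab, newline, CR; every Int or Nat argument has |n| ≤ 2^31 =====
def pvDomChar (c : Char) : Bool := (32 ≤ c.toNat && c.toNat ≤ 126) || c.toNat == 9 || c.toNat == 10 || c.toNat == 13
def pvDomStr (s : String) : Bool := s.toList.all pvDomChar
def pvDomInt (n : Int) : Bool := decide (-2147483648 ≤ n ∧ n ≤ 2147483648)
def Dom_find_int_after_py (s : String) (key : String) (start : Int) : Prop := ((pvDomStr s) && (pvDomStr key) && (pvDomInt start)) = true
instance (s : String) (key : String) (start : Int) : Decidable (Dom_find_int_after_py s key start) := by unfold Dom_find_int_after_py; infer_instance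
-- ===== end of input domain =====

-- B replaces A's three staged hand-written scans (whitespace / sign / digits) by a
-- table-driven DFA: one generic driver loop over a (state, class) transition dict; objective: alternative.

-- `c in " \t\r\n"` (single-char membership in a literal string): exact boolean disjunction
def pvIsWS (c : Char) : Bool := c = ' ' || c = '\t' || c = '\r' || c = '\n'

-- ===== PORT A =====
-- while i < len(s) and s[i] in " \t\r\n": i += 1
def pvSkipWS (cs : List Char) (i : Nat) : Nat :=
  if h : i < cs.length then
    if pvIsWS cs[i] then pvSkipWS cs (i + 1) else i
  else i
termination_by cs.length - i

-- while j < len(s) and s[j].isdigit(): j += 1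
def pvSkipDigits (cs : List Char) (j : Nat) : Nat :=
  if h : j < cs.length then
    if PySem.Chars.isdigit cs[j] then pvSkipDigits cs (j + 1) else j
  else j
termination_by cs.length - j

def find_int_after_py (s : String) (key : String) (start : Int) : Option Int × Int :=
  let f := PySem.Str.findFrom s key start          -- i = s.find(key, start)
  if f < 0 then (none, -1)                          -- if i < 0: return None, -1
  else
    let cs := s.toList
    let i0 := f.toNat + key.length                  -- i += len(key)
    let i := pvSkipWS cs i0                         -- whitespace loop
    let j0 := if _h : i < cs.length then            -- if j < len(s) and s[j] == "-": j += 1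
                (if cs[i] = '-' then i + 1 else i)
              else i
    let j := pvSkipDigits cs j0                     -- digit loop
    if j = i ∨ (j = i + 1 ∧ cs[i]? = some '-') then (none, -1)
    else (PySem.Int.ofChars? (PySem.List.slice cs (some (i : Int)) (some (j : Int))), (j : Int))

-- ===== PORT B =====
-- _classify(c): the character class fed to the transition table
def pvClassify (c : Char) : String :=
  if pvIsWS c then "w"
  else if c = '-' then "m"
  else if PySem.Chars.isdigit c then "d"
  else "o"

-- _TRANS: the transition table (a dict keyed by (state, class))
def pvTrans : PySem.Dict (Int × String) Int :=
  PySem.Dict.ofList [((0, "w"), 0), ((0, "m"), 1), ((0, "d"), 2), ((1, "d"), 2), ((2, "d"), 2)]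

-- the driver while-loop: returns the final (state, num_start, j)
def pvDfaRun (cs : List Char) (j : Nat) (state : Int) (numStart : Nat) : Int × Nat × Nat :=
  if h : j < cs.length then
    match PySem.Dict.get? pvTrans (state, pvClassify cs[j]) with
    | none => (state, numStart, j)                  -- if nxt is None: break
    | some nxt =>
        pvDfaRun cs (j + 1) nxt (if state = 0 ∧ nxt ≠ 0 then j else numStart)
  else (state, numStart, j)
termination_by cs.length - j

def find_int_after_py_alt (s : String) (key : String) (start : Int) : Option Int × Int :=
  let f := PySem.Str.findFrom s key start           -- i = s.find(key, start)
  if f < 0 then (none, -1)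
  else
    let cs := s.toList
    let j0 := f.toNat + key.length                  -- j = i + len(key)
    let r := pvDfaRun cs j0 0 j0                    -- the while loop
    if r.1 ≠ 2 then (none, -1)                      -- if state != 2: return None, -1
    else (PySem.Int.ofChars? (PySem.List.slice cs (some (r.2.1 : Int)) (some (r.2.2 : Int))), (r.2.2 : Int))

-- ===== PRECONDITION & SPEC =====
def Spec_find_int_after_py (s : String) (key : String) (start : Int) (out : Option Int × Int) : Prop := out = find_int_after_py_alt s key start
instance (s : String) (key : String) (start : Int) (out : Option Int × Int) : Decidable (Spec_find_int_after_py s key start out) := by unfold Spec_find_int_after_py; infer_instance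

-- ===== CLAIM (what is proved, stated in full; the proofs are below) =====
def Claim_equal_find_int_after_py : Prop := ∀ (s : String) (key : String) (start : Int), Dom_find_int_after_py s key start → Spec_find_int_after_py s key start (find_int_after_py s key start)

-- ===== LEMMAS AND PROOFS =====

-- a digit character is neither in " \t\r\n" nor '-'
theorem pvIsWS_of_isdigit {c : Char} (h : PySem.Chars.isdigit c = true) :
    pvIsWS c = false ∧ c ≠ '-' := by
  simp only [PySem.Chars.isdigit, Bool.and_eq_true, decide_eq_true_eq] at h
  have h0 : '0' ≤ c := h.1
  have hne : ∀ d : Char, ¬ ('0' ≤ d) → c ≠ d := fun d hd he => hd (he ▸ h0)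
  constructor
  · simp only [pvIsWS, Bool.or_eq_false_iff, decide_eq_false_iff_not]
    exact ⟨⟨⟨hne ' ' (by decide), hne '\t' (by decide)⟩, hne '\r' (by decide)⟩,
      hne '\n' (by decide)⟩
  · exact hne '-' (by decide)

theorem pvClassify_digit {c : Char} (h : PySem.Chars.isdigit c = true) :
    pvClassify c = "d" := by
  obtain ⟨hw, hm⟩ := pvIsWS_of_isdigit h
  simp [pvClassify, hw, hm, h]

theorem pvClassify_cases (c : Char) :
    pvClassify c = "w" ∨ pvClassify c = "m" ∨ pvClassify c = "d" ∨ pvClassify c = "o" := by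
  unfold pvClassify; split_ifs <;> simp

theorem pvClassify_eq_d_iff (c : Char) :
    pvClassify c = "d" ↔ PySem.Chars.isdigit c = true := by
  constructor
  · intro h; unfold pvClassify at h; split_ifs at h <;> simp_all
  · exact pvClassify_digit

-- the literal transition-table lookups the proofs need
theorem pvTrans_nondigit_stuck : ∀ cls ∈ (["w", "m", "o"] : List String), ∀ st ∈ ([1, 2] : List Int),
    PySem.Dict.get? pvTrans (st, cls) = none := by decide

theorem pvSkipWS_stop (cs : List Char) (i : Nat) (h : pvSkipWS cs i < cs.length) :
    pvIsWS (cs[pvSkipWS cs i]'h) = false := by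
  fun_induction pvSkipWS cs i with
  | case1 i hi hws ih => exact ih h
  | case2 i hi hws => simpa using hws
  | case3 i hi => omega

theorem pvSkipDigits_ge (cs : List Char) (j : Nat) : j ≤ pvSkipDigits cs j := by
  fun_induction pvSkipDigits cs j with
  | case1 j h hd ih => omega
  | case2 j h hd => omega
  | case3 j h => omega

-- the driver is stuck at a non-digit character in states 1 and 2
theorem pvDfaRun_stuck (cs : List Char) (j : Nat) (st : Int) (hst : st = 1 ∨ st = 2)
    (ns : Nat) (hd : ∀ h : j < cs.length, PySem.Chars.isdigit cs[j] = false) :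
    pvDfaRun cs j st ns = (st, ns, j) := by
  by_cases h : j < cs.length
  · rw [pvDfaRun, dif_pos h]
    have hstm : st ∈ ([1, 2] : List Int) := by rcases hst with h1 | h1 <;> simp [h1]
    have hnd : pvClassify cs[j] ≠ "d" := fun hdd => by
      have := (pvClassify_eq_d_iff cs[j]).mp hdd
      simp [hd h] at this
    rcases pvClassify_cases cs[j] with hcl | hcl | hcl | hcl
    · rw [hcl, pvTrans_nondigit_stuck "w" (by decide) st hstm]
    · rw [hcl, pvTrans_nondigit_stuck "m" (by decide) st hstm]
    · exact absurd hcl hnd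
    · rw [hcl, pvTrans_nondigit_stuck "o" (by decide) st hstm]
  · rw [pvDfaRun, dif_neg h]

-- in state 0 the whitespace prefix is consumed with state and num_start unchanged
theorem pvDfaRun_ws (cs : List Char) (j : Nat) (ns : Nat) :
    pvDfaRun cs j 0 ns = pvDfaRun cs (pvSkipWS cs j) 0 ns := by
  fun_induction pvSkipWS cs j with
  | case1 i h hws ih =>
      rw [← ih]
      rw [pvDfaRun, dif_pos h]
      have hcl : pvClassify cs[i] = "w" := by simp [pvClassify, hws]
      rw [hcl]
      rfl
  | case2 i h hws => rfl
  | case3 i h => rfl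

-- in the accepting state 2 the DFA consumes exactly the digit run
theorem pvDfaRun_digits (cs : List Char) (j : Nat) (ns : Nat) :
    pvDfaRun cs j 2 ns = (2, ns, pvSkipDigits cs j) := by
  fun_induction pvSkipDigits cs j with
  | case1 j h hd ih =>
      rw [pvDfaRun, dif_pos h, pvClassify_digit hd]
      exact ih
  | case2 j h hd =>
      exact pvDfaRun_stuck cs j 2 (Or.inr rfl) ns (fun _ => by simpa using hd)
  | case3 j h =>
      exact pvDfaRun_stuck cs j 2 (Or.inr rfl) ns (fun h' => absurd h' h)

theorem find_int_after_eq (s : String) (key : String) (start : Int) :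
    find_int_after_py s key start = find_int_after_py_alt s key start := by
  unfold find_int_after_py find_int_after_py_alt
  set f := PySem.Str.findFrom s key start with hf
  by_cases hneg : f < 0
  · simp [hneg]
  · simp only [hneg, if_false]
    set cs := s.toList with hcs
    set i0 := f.toNat + key.length with hi0
    set i := pvSkipWS cs i0 with hi
    rw [pvDfaRun_ws cs i0 i0, ← hi]
    by_cases h : i < cs.length
    · have hws : pvIsWS (cs[i]'h) = false := pvSkipWS_stop cs i0 h
      rw [dif_pos h]                                  -- A: resolve `j < len(s)` of the sign test
      by_cases hm : cs[i] = '-'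
      · -- minus sign: the DFA moves to state 1 and records num_start = i
        have hcl : pvClassify (cs[i]'h) = "m" := by rw [hm]; decide
        rw [if_pos hm]                                -- A: j0 = i + 1
        have hmopt : cs[i]? = some '-' := by simp [List.getElem?_eq_getElem h, hm]
        by_cases h1 : i + 1 < cs.length
        · by_cases hd : PySem.Chars.isdigit (cs[i+1]'h1) = true
          · -- at least one digit after the minus: accepted by both
            have hrun : pvDfaRun cs i 0 i0 = (2, i, pvSkipDigits cs (i+2)) := by
              rw [pvDfaRun, dif_pos h, hcl]
              show pvDfaRun cs (i+1) 1 i = _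
              rw [pvDfaRun, dif_pos h1, pvClassify_digit hd]
              show pvDfaRun cs (i+2) 2 i = _
              rw [pvDfaRun_digits]
            rw [hrun]
            have hsd : pvSkipDigits cs (i+1) = pvSkipDigits cs (i+2) := by
              rw [pvSkipDigits, dif_pos h1, if_pos hd]
            have hge : i + 2 ≤ pvSkipDigits cs (i+2) := pvSkipDigits_ge cs (i+2)
            rw [hsd, if_neg (by omega), if_neg (by norm_num)]
          · -- '-' followed by a non-digit: rejected by both
            have hrun : pvDfaRun cs i 0 i0 = (1, i, i+1) := by
              rw [pvDfaRun, dif_pos h, hcl]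
              show pvDfaRun cs (i+1) 1 i = _
              exact pvDfaRun_stuck cs (i+1) 1 (Or.inl rfl) i (fun _ => by simpa using hd)
            rw [hrun]
            have hsd : pvSkipDigits cs (i+1) = i + 1 := by
              rw [pvSkipDigits, dif_pos h1, if_neg hd]
            rw [hsd, if_pos (Or.inr ⟨rfl, hmopt⟩), if_pos (by norm_num)]
        · -- '-' at the very end of the string: rejected by both
          have hrun : pvDfaRun cs i 0 i0 = (1, i, i+1) := by
            rw [pvDfaRun, dif_pos h, hcl]
            show pvDfaRun cs (i+1) 1 i = _
            exact pvDfaRun_stuck cs (i+1) 1 (Or.inl rfl) i (fun h' => absurd h' h1)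
          rw [hrun]
          have hsd : pvSkipDigits cs (i+1) = i + 1 := by
            rw [pvSkipDigits, dif_neg (by omega)]
          rw [hsd, if_pos (Or.inr ⟨rfl, hmopt⟩), if_pos (by norm_num)]
      · -- no minus sign
        rw [if_neg hm]                                -- A: j0 = i
        have hmopt : cs[i]? ≠ some '-' := by
          simp [List.getElem?_eq_getElem h, hm]
        by_cases hd : PySem.Chars.isdigit (cs[i]'h) = true
        · -- digit right away: accepted by both
          have hrun : pvDfaRun cs i 0 i0 = (2, i, pvSkipDigits cs (i+1)) := by
            rw [pvDfaRun, dif_pos h, pvClassify_digit hd]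
            show pvDfaRun cs (i+1) 2 i = _
            rw [pvDfaRun_digits]
          rw [hrun]
          have hsd : pvSkipDigits cs i = pvSkipDigits cs (i+1) := by
            rw [pvSkipDigits, dif_pos h, if_pos hd]
          have hge : i + 1 ≤ pvSkipDigits cs (i+1) := pvSkipDigits_ge cs (i+1)
          rw [hsd, if_neg (by rintro (h' | ⟨h', hc⟩) <;> first | omega | exact hmopt hc),
              if_neg (by norm_num)]
        · -- neither whitespace, minus nor digit: rejected by both
          have hcl : pvClassify (cs[i]'h) = "o" := by simp [pvClassify, hws, hm, hd]
          have hrun : pvDfaRun cs i 0 i0 = (0, i0, i) := by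
            rw [pvDfaRun, dif_pos h, hcl]
            rfl
          rw [hrun]
          have hsd : pvSkipDigits cs i = i := by
            rw [pvSkipDigits, dif_pos h, if_neg hd]
          rw [hsd, if_pos (Or.inl rfl), if_pos (by norm_num)]
    · -- the scan starts at/after the end of the string: rejected by both
      have hrun : pvDfaRun cs i 0 i0 = (0, i0, i) := by
        rw [pvDfaRun, dif_neg h]
      rw [hrun, dif_neg h]
      have hsd : pvSkipDigits cs i = i := by
        rw [pvSkipDigits, dif_neg h]
      rw [hsd, if_pos (Or.inl rfl), if_pos (by norm_num)]

-- ===== VERDICT (by name: the statement is the Claim_ definition above) =====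
theorem find_int_after_py_spec : Claim_equal_find_int_after_py := by
  intro s key start _
  unfold Spec_find_int_after_py
  exact find_int_after_eq s key start
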